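-- pv_equiv track=rewrite | github.com/TerraceCN/atsms | air780e/encoding.py | gsm7bit_decode
-- ===== SOURCE A (Python) =====
-- def gsm7bit_decode(f):
--     gsm = "@£$¥èéùìòÇ\nØø\rÅåΔ_ΦΓΛΩΠΨΣΘΞ\x1bÆæßÉ !\"#¤%&'()*+,-./0123456789:;<=>?¡ABCDEFGHIJKLMNOPQRSTUVWXYZÄÖÑÜ`¿abcdefghijklmnopqrstuvwxyzäöñüà"
--     ext = "````````````````````^```````````````````{}`````\\````````````[~]`|````````````````````````````````````€``````````````````````````"
--
--     if len(f) == 0: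
--         return ""
--
--     f = "".join([f"{i:08b}" for i in f][::-1])
--     padlen = len(f) % 7
--     f = f[padlen::]
--
--     ints = [int(f[i : i + 7], 2) for i in range(0, len(f), 7)][::-1]
--     result = []
--     if ints[0] == 0:
--         ints.pop(0)
--     is_ext = False
--     for i in ints:
--         if is_ext:
--             result.append(ext[i])
--             is_ext = False
--         elif i == 0x1B:
--             is_ext = True
--         else:
--             result.append(gsm[i])
--     return "".join(result)
-- ===== SOURCE B (Python) =====
-- def gsm7bit_decode(f):
--     gsm = "@£$¥èéùìòÇ\nØø\rÅåΔ_ΦΓΛΩΠΨΣΘΞ\x1bÆæßÉ !\"#¤%&'()*+,-./0123456789:;<=>?¡ABCDEFGHIJKLMNOPQRSTUVWXYZÄÖÑÜ`¿abcdefghijklmnopqrstuvwxyzäöñüà"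
--     ext = "````````````````````^```````````````````{}`````\\````````````[~]`|````````````````````````````````````€``````````````````````````"
--
--     # single pass over the bytes with an integer accumulator:
--     # septets come out LSB-first, no bit strings, no reversals
--     septets = []
--     val = 0
--     bits = 0
--     for b in f:
--         val += b << bits
--         bits += 8
--         while bits >= 7:
--             septets.append(val & 0x7F)
--             val >>= 7
--             bits -= 7
--
--     if septets and septets[0] == 0:
--         septets = septets[1:]
--
--     out = []
--     i = 0
--     n = len(septets)
--     while i < n:
--         s = septets[i]
--         if s == 0x1B:
--             if i + 1 < n:
--                 out.append(ext[septets[i + 1]])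
--             i += 2
--         else:
--             out.append(gsm[s])
--             i += 1
--     return "".join(out)
-- ===== Notes on version B (the rewrite author's own statement) =====
-- stated objective: alternative
-- what changed: A formats each value as a zero-padded binary string, joins them reversed, trims the 8n%7 leading bits, re-parses 7-char slices and reverses again; B never builds strings: one pass over the bytes with an integer accumulator (val, bits += 8) emits each septet LSB-first by shift/mask, then the same leading-zero-septet drop and gsm/ext mapping. Pre_ restricts to the natural domain of byte values 0-255: outside it A's f-string formatting raises ValueError on most negative values and silently feeds more or fewer than 8 binary digits per value, an artefact of string formatting.
-- outside the precondition, e.g. on gsm7bit_decode([-5]): A returns 'é', B returns 'ä'; on gsm7bit_decode([393, 32, 130]): A returns 'Ç¥_', B returns 'ÇCò'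
import Mathlib
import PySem

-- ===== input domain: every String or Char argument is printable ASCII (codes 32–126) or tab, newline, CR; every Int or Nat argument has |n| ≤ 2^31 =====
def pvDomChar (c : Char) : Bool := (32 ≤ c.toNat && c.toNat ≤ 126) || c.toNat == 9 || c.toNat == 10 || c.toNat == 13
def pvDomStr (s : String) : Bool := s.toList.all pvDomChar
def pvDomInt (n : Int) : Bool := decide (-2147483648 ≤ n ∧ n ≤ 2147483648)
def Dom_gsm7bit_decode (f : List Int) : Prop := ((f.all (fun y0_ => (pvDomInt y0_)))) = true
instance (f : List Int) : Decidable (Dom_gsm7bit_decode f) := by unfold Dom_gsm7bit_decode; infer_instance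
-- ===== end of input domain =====

-- B replaces A's binary-string building (format → join → reverse → slice → reparse) by a
-- single pass of integer bit arithmetic with an accumulator (no intermediate strings,
-- no list reversals); objective: alternative.

-- shared character tables (the two Python sources carry the same literals)
def pvGsmChars : List Char := "@£$¥èéùìòÇ\nØø\rÅåΔ_ΦΓΛΩΠΨΣΘΞ\x1BÆæßÉ !\"#¤%&'()*+,-./0123456789:;<=>?¡ABCDEFGHIJKLMNOPQRSTUVWXYZÄÖÑÜ`¿abcdefghijklmnopqrstuvwxyzäöñüà".toList
def pvExtChars : List Char := "````````````````````^```````````````````{}`````\\````````````[~]`|````````````````````````````````````€``````````````````````````".toList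
-- tbl[i]: under Pre_ every index is a septet 0 ≤ i < 128 = |tbl|, so the default is never used
def pvLookup (tbl : List Char) (i : Int) : Char := (PySem.List.pyGet? tbl i).getD '@'

-- ===== PORT A =====
-- f"{n:b}" for n ≥ 0: binary digits, MSB first
def pvNatBin (n : Nat) : List Char :=
  if _h : n < 2 then [if n = 1 then '1' else '0']
  else pvNatBin (n / 2) ++ [if n % 2 = 1 then '1' else '0']
  decreasing_by omega

-- f"{i:08b}": zero-pad to width 8; a negative i gets a '-' sign inside the width
def pvBin8 (i : Int) : List Char :=
  if i < 0 then
    let d := pvNatBin i.natAbs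
    '-' :: (List.replicate (7 - d.length) '0' ++ d)
  else
    let d := pvNatBin i.toNat
    List.replicate (8 - d.length) '0' ++ d

-- int(s, 2): exact on binary-digit strings (the only ones reached under Pre_;
-- a '-' in the middle, from a negative input, makes Python raise ValueError)
def pvParseBin (cs : List Char) : Int :=
  cs.foldl (fun acc c => acc * 2 + (if c = '1' then 1 else 0)) 0

-- the body of A's final for-loop, state (result, is_ext)
def pvStepA (acc : List Char × Bool) (i : Int) : List Char × Bool :=
  if acc.2 then (acc.1 ++ [pvLookup pvExtChars i], false)
  else if i = 27 then (acc.1, true)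
  else (acc.1 ++ [pvLookup pvGsmChars i], false)

def gsm7bit_decode (f : List Int) : String :=
  if f.length = 0 then "" else
  let s := ((f.map (fun i => pvBin8 i)).reverse).flatten
  let padlen : Nat := s.length % 7
  let s2 := PySem.List.slice s (some (padlen : Int)) none
  let ints := ((PySem.List.pyRange 0 (s2.length : Int) 7).map
      (fun i => pvParseBin (PySem.List.slice s2 (some i) (some (i + 7))))).reverse
  -- ints[0] == 0 → ints.pop(0)  (ints is never empty when f is non-empty)
  let ints2 := if PySem.List.pyGet? ints 0 = some (0 : Int) then ints.drop 1 else ints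
  String.mk (ints2.foldl pvStepA ([], false)).1

-- ===== PORT B =====
-- the inner `while bits >= 7` loop: extract septets LSB-first
def pvEmit (val : Int) (bits : Nat) (acc : List Int) : Int × Nat × List Int :=
  if h : bits ≥ 7 then pvEmit (val >>> (7 : Nat)) (bits - 7) (Int.land val 127 :: acc)
  else (val, bits, acc)
  decreasing_by omega

-- the outer for-loop over the input bytes
def pvUnpack : List Int → Int → Nat → List Int → List Int
  | [], _, _, acc => acc.reverse
  | b :: rest, val, bits, acc =>
    let val' := val + (b <<< bits)
    let bits' := bits + 8
    let r := pvEmit val' bits' acc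
    pvUnpack rest r.1 r.2.1 r.2.2

-- the final while-loop over septets (index i advancing by 1 or 2)
def pvMapSepts : List Int → List Char
  | [] => []
  | s :: rest =>
    if s = 27 then
      match rest with
      | [] => []
      | t :: rest' => pvLookup pvExtChars t :: pvMapSepts rest'
    else pvLookup pvGsmChars s :: pvMapSepts rest

def gsm7bit_decode_alt (f : List Int) : String :=
  let septets := pvUnpack f 0 0 []
  let septets2 := match septets with
    | 0 :: rest => rest
    | l => l
  String.mk (pvMapSepts septets2)

-- ===== PRECONDITION & SPEC =====
-- Pre_ restricts to the natural domain of byte values 0–255: outside it A's f-string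
-- formatting raises ValueError on most negative values and silently feeds more or fewer
-- than 8 binary digits per value into the bit stream, an artefact of string formatting.
def Pre_gsm7bit_decode (f : List Int) : Prop := ∀ b ∈ f, 0 ≤ b ∧ b < 256
instance (f : List Int) : Decidable (Pre_gsm7bit_decode f) := by unfold Pre_gsm7bit_decode; infer_instance
def pvWitness_gsm7bit_decode : List Int := [200, 50, 155, 253, 6]

def Spec_gsm7bit_decode (f : List Int) (out : String) : Prop := out = gsm7bit_decode_alt f
instance (f : List Int) (out : String) : Decidable (Spec_gsm7bit_decode f out) := by unfold Spec_gsm7bit_decode; infer_instance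

-- ===== CLAIM (what is proved, stated in full; the proofs are below) =====
def Claim_equal_gsm7bit_decode : Prop := ∀ (f : List Int), Dom_gsm7bit_decode f → Pre_gsm7bit_decode f → Spec_gsm7bit_decode f (gsm7bit_decode f)

-- ===== LEMMAS AND PROOFS =====

-- value of a binary-digit list, MSB first (Nat-level mirror of pvParseBin)
def pvBV (cs : List Char) : Nat :=
  cs.foldl (fun acc c => acc * 2 + (if c = '1' then 1 else 0)) 0

-- the packed value and total bit count of the whole input, little-endian, 8 bits per byte
def pvPack : List Int → Nat
  | [] => 0
  | b :: r => b.natAbs + pvPack r * 256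
def pvTot : List Int → Nat
  | [] => 0
  | b :: r => 8 + pvTot r

theorem pvBV_acc (l : List Char) : ∀ (a : Nat),
    l.foldl (fun acc c => acc * 2 + (if c = '1' then 1 else 0)) a = a * 2 ^ l.length + pvBV l := by
  induction l with
  | nil => intro a; simp [pvBV]
  | cons c t ih =>
    intro a
    have hbv : pvBV (c :: t) = (0 * 2 + (if c = '1' then 1 else 0)) * 2 ^ t.length + pvBV t := by
      show List.foldl _ (0 * 2 + (if c = '1' then 1 else 0)) t = _
      rw [ih]
    simp only [List.foldl_cons, List.length_cons]
    rw [ih, hbv]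
    ring

theorem pvBV_cons (c : Char) (t : List Char) :
    pvBV (c :: t) = (if c = '1' then 1 else 0) * 2 ^ t.length + pvBV t := by
  show List.foldl _ (0 * 2 + (if c = '1' then 1 else 0)) t = _
  rw [pvBV_acc]
  ring


theorem pvBV_append (l1 l2 : List Char) : pvBV (l1 ++ l2) = pvBV l1 * 2 ^ l2.length + pvBV l2 := by
  simp only [pvBV, List.foldl_append]
  rw [pvBV_acc l2]
  rfl


theorem pvBV_lt (l : List Char) : pvBV l < 2 ^ l.length := by
  induction l with
  | nil => simp [pvBV]
  | cons c t ih =>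
    rw [pvBV_cons, List.length_cons, pow_succ]
    have : (if c = '1' then 1 else 0) ≤ 1 := by split <;> omega
    nlinarith


theorem pvParseBin_aux (cs : List Char) : ∀ (a : Nat),
    cs.foldl (fun acc c => acc * 2 + (if c = '1' then 1 else 0)) ((a : Nat) : Int) =
      ((cs.foldl (fun acc c => acc * 2 + (if c = '1' then 1 else 0)) a : Nat) : Int) := by
  induction cs with
  | nil => intro a; rfl
  | cons c t ih =>
    intro a
    simp only [List.foldl_cons]
    rw [show ((a : Int) * 2 + (if c = '1' then 1 else 0)) =
        (((a * 2 + (if c = '1' then 1 else 0) : Nat)) : Int) by split <;> push_cast <;> ring]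
    exact ih _

theorem pvParseBin_eq (cs : List Char) : pvParseBin cs = (pvBV cs : Int) := by
  simpa using pvParseBin_aux cs 0


theorem pvNatBin_bv (n : Nat) : pvBV (pvNatBin n) = n := by
  induction n using pvNatBin.induct with
  | case1 n h =>
    rw [pvNatBin]
    simp only [h, dif_pos]
    have : n = 0 ∨ n = 1 := by omega
    rcases this with h0 | h1 <;> subst_vars <;> decide
  | case2 n h ih =>
    rw [pvNatBin]
    simp only [h, dif_neg, not_false_iff]
    rw [pvBV_append, ih]
    have : pvBV [if n % 2 = 1 then '1' else '0'] = n % 2 := by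
      split <;> simp_all [pvBV]
    rw [this]
    simp only [List.length_singleton, pow_one]
    omega


theorem pvNatBin_len_le (k : Nat) : ∀ (n : Nat), n < 2 ^ k → 1 ≤ k → (pvNatBin n).length ≤ k := by
  induction k with
  | zero => intro n _ hk; omega
  | succ k ih =>
    intro n hn _
    rw [pvNatBin]
    by_cases h : n < 2
    · simp [h]
    · rw [dif_neg h, List.length_append, List.length_singleton]
      have hk1 : 1 ≤ k := by
        by_contra hk0
        have : k = 0 := by omega
        subst this
        omega
      have : n / 2 < 2 ^ k := by
        rw [pow_succ] at hn
        omega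
      have := ih (n / 2) this hk1
      omega

theorem pvNatBin_len_pos (n : Nat) : 1 ≤ (pvNatBin n).length := by
  rw [pvNatBin]
  by_cases h : n < 2
  · simp [h]
  · rw [dif_neg h, List.length_append, List.length_singleton]
    omega


theorem pvBV_replicate_zero (k : Nat) (l : List Char) : pvBV (List.replicate k '0' ++ l) = pvBV l := by
  induction k with
  | zero => simp
  | succ k ih =>
    rw [List.replicate_succ, List.cons_append]
    simpa [pvBV, List.foldl_cons] using ih


theorem pvBin8_bv {b : Int} (hb : 0 ≤ b) : pvBV (pvBin8 b) = b.natAbs := by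
  rw [pvBin8, if_neg (by omega)]
  simp only
  rw [pvBV_replicate_zero, pvNatBin_bv]
  omega


theorem pvBin8_length {b : Int} (hb : 0 ≤ b) (hb2 : b < 256) : (pvBin8 b).length = 8 := by
  rw [pvBin8, if_neg (by omega)]
  simp only [List.length_append, List.length_replicate]
  have h1 : b.toNat < 2 ^ 8 := by omega
  have h2 := pvNatBin_len_le 8 b.toNat h1 (by norm_num)
  have h3 := pvNatBin_len_pos b.toNat
  omega


-- A's joined, reversed bit string has value pvPack f and length pvTot f
theorem pvFlat_spec (f : List Int) (hf : ∀ b ∈ f, 0 ≤ b ∧ b < 256) :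
    pvBV (((f.map (fun i => pvBin8 i)).reverse).flatten) = pvPack f ∧
    (((f.map (fun i => pvBin8 i)).reverse).flatten).length = pvTot f := by
  induction f with
  | nil => simp [pvBV, pvPack, pvTot]
  | cons b r ih =>
    obtain ⟨hb, hb2⟩ := hf b (List.mem_cons_self ..)
    obtain ⟨ih1, ih2⟩ := ih (fun x hx => hf x (List.mem_cons_of_mem _ hx))
    simp only [List.map_cons, List.reverse_cons, List.flatten_append]
    constructor
    · rw [pvBV_append, ih1]
      simp only [List.flatten_cons, List.flatten_nil, List.append_nil]
      rw [pvBin8_bv hb, pvBin8_length hb hb2, pvPack]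
      norm_num
      omega
    · simp only [List.length_append, List.flatten_cons, List.flatten_nil, List.append_nil, ih2]
      rw [pvBin8_length hb hb2, pvTot]
      ring

-- value of a dropped prefix
theorem pvBV_drop (l : List Char) (k : Nat) (_hk : k ≤ l.length) :
    pvBV (l.drop k) = pvBV l % 2 ^ (l.length - k) := by
  have h1 : pvBV l = pvBV (l.take k) * 2 ^ (l.drop k).length + pvBV (l.drop k) := by
    conv_lhs => rw [← List.take_append_drop k l]
    exact pvBV_append _ _
  have h2 : (l.drop k).length = l.length - k := by simp
  rw [h1, h2, mul_comm, Nat.mul_add_mod, Nat.mod_eq_of_lt]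
  rw [← h2]
  exact pvBV_lt _

-- one 7-char chunk of an exactly-7m-char string, counted from the MSB end
theorem pvChunk_val (l : List Char) (m k : Nat) (hl : l.length = 7 * m) (hk : k < m) :
    pvBV ((l.drop (7 * k)).take 7) = pvBV l / 2 ^ (7 * (m - 1 - k)) % 128 := by
  set c := (l.drop (7 * k)).take 7 with hc
  set e := 7 * (m - 1 - k) with he
  have hlen : (l.drop (7 * k)).length = 7 * (m - k) := by rw [List.length_drop, hl]; omega
  have hclen : c.length = 7 := by rw [hc, List.length_take]; omega
  have hsplit : l.drop (7 * k) = c ++ l.drop (7 * k + 7) := by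
    rw [hc, ← List.drop_drop]
    exact (List.take_append_drop 7 (l.drop (7 * k))).symm
  have hrlen : (l.drop (7 * k + 7)).length = e := by rw [List.length_drop, hl, he]; omega
  have hv1 : pvBV (l.drop (7 * k)) = pvBV c * 2 ^ e + pvBV (l.drop (7 * k + 7)) := by
    rw [hsplit, pvBV_append, hrlen]
  have hv2 : pvBV (l.drop (7 * k)) = pvBV l % 2 ^ (7 * (m - k)) := by
    rw [pvBV_drop l (7 * k) (by omega), hl, show 7 * m - 7 * k = 7 * (m - k) by omega]
  -- decompose pvBV l
  have hQ := Nat.div_add_mod (pvBV l) (2 ^ (7 * (m - k)))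
  set Q := pvBV l / 2 ^ (7 * (m - k)) with hQdef
  have hpow : 2 ^ (7 * (m - k)) = 2 ^ e * 2 ^ 7 := by
    rw [← pow_add]
    congr 1
    omega
  have hr : pvBV (l.drop (7 * k + 7)) < 2 ^ e := by
    rw [← hrlen]; exact pvBV_lt _
  have hcb : pvBV c < 128 := by
    have := pvBV_lt c
    rwa [hclen] at this
  -- pvBV l = (Q * 2^7 + pvBV c) * 2^e + rest
  have hl2 : pvBV l = (Q * 2 ^ 7 + pvBV c) * 2 ^ e + pvBV (l.drop (7 * k + 7)) := by
    have : pvBV l = 2 ^ (7 * (m - k)) * Q + pvBV l % 2 ^ (7 * (m - k)) := by omega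
    rw [this, ← hv2, hv1, hpow]
    ring
  rw [hl2]
  rw [show (Q * 2 ^ 7 + pvBV c) * 2 ^ e + pvBV (l.drop (7 * k + 7))
      = pvBV (l.drop (7 * k + 7)) + (Q * 2 ^ 7 + pvBV c) * 2 ^ e by ring]
  rw [Nat.add_mul_div_right _ _ ((by positivity : 0 < 2 ^ e)),
      Nat.div_eq_of_lt hr]
  have : (0 + (Q * 2 ^ 7 + pvBV c)) % 128 = pvBV c := by
    rw [Nat.zero_add, show Q * 2 ^ 7 + pvBV c = 128 * Q + pvBV c by ring, Nat.mul_add_mod,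
        Nat.mod_eq_of_lt hcb]
  omega

-- A's comprehension over range(0, len, 7), already reversed, as a closed formula
theorem pvRevMapRange {α : Type} (g : Nat → α) (m : Nat) :
    ((List.range m).map g).reverse = (List.range m).map (fun j => g (m - 1 - j)) := by
  apply List.ext_getElem
  · simp
  · intro i h1 h2
    simp [List.getElem_reverse]

theorem pvIntsA (l : List Char) (m : Nat) (hl : l.length = 7 * m) :
    ((PySem.List.pyRange 0 (l.length : Int) 7).map
      (fun i => pvParseBin (PySem.List.slice l (some i) (some (i + 7))))).reverse =
    (List.range m).map (fun j => ((pvBV l / 2 ^ (7 * j) % 128 : Nat) : Int)) := by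
  rw [PySem.List.pyRange_of_pos 0 (l.length : Int) (by norm_num : (0:Int) < 7)]
  have hcount : (if (0:Int) < (l.length : Int) then (((l.length : Int) - 0 + 7 - 1) / 7).toNat else 0) = m := by
    rcases Nat.eq_zero_or_pos m with hm | hm
    · rw [if_neg]
      · omega
      · simp [hl, hm]
    · rw [if_pos (by simp [hl]; omega)]
      rw [hl]
      push_cast
      rw [show (7 * (m:Int) - 0 + 7 - 1) = 6 + (m:Int) * 7 by ring,
          Int.add_mul_ediv_right _ _ (by norm_num : (7:Int) ≠ 0)]
      norm_num
  rw [hcount, List.map_map, pvRevMapRange]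
  apply List.map_congr_left
  intro j hj
  rw [List.mem_range] at hj
  simp only [Function.comp]
  rw [show (0 + 7 * ((m - 1 - j : Nat) : Int)) = ((7 * (m - 1 - j) : Nat) : Int) by push_cast; ring,
      show (((7 * (m - 1 - j) : Nat) : Int) + 7) = ((7 * (m - 1 - j) : Nat) : Int) + ((7 : Nat) : Int) by norm_num,
      PySem.List.slice_natCast_add]
  rw [pvParseBin_eq, pvChunk_val l m (m - 1 - j) hl (by omega),
      show m - 1 - (m - 1 - j) = j from by omega]

theorem pvLand127 (v : Nat) : Int.land ((v : Nat) : Int) 127 = ((v % 128 : Nat) : Int) := by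
  have h : v &&& 127 = v % 128 := by
    have := Nat.and_two_pow_sub_one_eq_mod v 7
    norm_num at this
    exact this
  calc Int.land ((v : Nat) : Int) 127 = ((v &&& 127 : Nat) : Int) := congrArg Int.ofNat rfl
    _ = ((v % 128 : Nat) : Int) := by rw [h]

theorem pvShift7 (v : Nat) : ((v : Nat) : Int) >>> (7 : Nat) = ((v / 128 : Nat) : Int) := by
  rw [Int.shiftRight_eq_div_pow, Int.natCast_div]

theorem pvEmit_spec (bits : Nat) : ∀ (v : Nat) (acc : List Int),
    pvEmit (v : Nat) bits acc =
      (((v / 2 ^ (7 * (bits / 7)) : Nat) : Int), bits % 7,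
       ((List.range (bits / 7)).map (fun j => ((v / 2 ^ (7 * j) % 128 : Nat) : Int))).reverse ++ acc) := by
  induction bits using Nat.strong_induction_on with
  | _ bits ih =>
    intro v acc
    rw [pvEmit]
    by_cases h : 7 ≤ bits
    · rw [dif_pos h, pvShift7, pvLand127]
      rw [ih (bits - 7) (by omega) (v / 128) _]
      set q := bits / 7 with hq
      have hq1 : 1 ≤ q := by omega
      have hq7 : (bits - 7) / 7 = q - 1 := by omega
      have hm7 : (bits - 7) % 7 = bits % 7 := by omega
      rw [hq7, hm7]
      refine congrArg₂ _ ?_ (congrArg₂ _ rfl ?_)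
      · congr 1
        rw [Nat.div_div_eq_div_mul,
            show (2:Nat) ^ (7 * q) = 2 ^ 7 * 2 ^ (7 * (q - 1)) by rw [← pow_add]; congr 1; omega]
        norm_num
      · -- list part
        have hrange : List.range q = 0 :: (List.range (q - 1)).map Nat.succ := by
          rw [show q = (q - 1) + 1 by omega, List.range_succ_eq_map]
          simp
        rw [hrange]
        simp only [List.map_cons, List.map_map, List.reverse_cons]
        rw [List.append_assoc]
        congr 1
        · apply congrArg
          apply List.map_congr_left
          intro j hj
          simp only [Function.comp]
          congr 2
          rw [Nat.div_div_eq_div_mul,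
              show (2:Nat) ^ (7 * Nat.succ j) = 2 ^ 7 * 2 ^ (7 * j) by rw [← pow_add]; congr 1; omega]
          norm_num
        · simp
    · rw [dif_neg h]
      have h1 : bits / 7 = 0 := by omega
      have h2 : bits % 7 = bits := by omega
      rw [h1, h2]
      simp

theorem pvUnpack_spec (rest : List Int) : ∀ (_ : ∀ b ∈ rest, 0 ≤ b ∧ b < 256) (v bits : Nat) (acc : List Int),
    v < 2 ^ bits → bits < 7 →
    pvUnpack rest (v : Nat) bits acc =
      acc.reverse ++ (List.range ((bits + pvTot rest) / 7)).map
        (fun j => (((v + pvPack rest * 2 ^ bits) / 2 ^ (7 * j) % 128 : Nat) : Int)) := by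
  induction rest with
  | nil =>
    intro _ v bits acc hv hb
    simp [pvUnpack, pvTot, pvPack, Nat.div_eq_of_lt hb]
  | cons b r ih =>
    intro hr v bits acc hv hb
    obtain ⟨hb0, hb256⟩ := hr b (List.mem_cons_self ..)
    have hr' : ∀ x ∈ r, 0 ≤ x ∧ x < 256 := fun x hx => hr x (List.mem_cons_of_mem _ hx)
    simp only [pvUnpack]
    have hcast : ((v : Nat) : Int) + b <<< bits = (((v + b.natAbs * 2 ^ bits : Nat)) : Int) := by
      rw [Int.shiftLeft_eq]
      conv_lhs => rw [← Int.natAbs_of_nonneg hb0]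
      push_cast
      ring
    rw [hcast]
    set v' := v + b.natAbs * 2 ^ bits with hv'def
    set bits' := bits + 8 with hbits'
    have hblt : b.natAbs < 2 ^ 8 := by omega
    have hv'lt : v' < 2 ^ bits' := by
      have h1 : v' < (b.natAbs + 1) * 2 ^ bits := by
        have := pow_pos (by norm_num : (0:Nat) < 2) bits
        nlinarith
      calc v' < (b.natAbs + 1) * 2 ^ bits := h1
        _ ≤ 2 ^ 8 * 2 ^ bits := Nat.mul_le_mul_right _ (by omega)
        _ = 2 ^ bits' := by rw [← pow_add]; congr 1; omega
    rw [pvEmit_spec bits' v' acc]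
    set q := bits' / 7 with hq
    set bits'' := bits' % 7 with hbits''
    set v'' := v' / 2 ^ (7 * q) with hv''
    have hdm : 7 * q + bits'' = bits' := by omega
    have hv''lt : v'' < 2 ^ bits'' := by
      rw [hv'', Nat.div_lt_iff_lt_mul (by positivity)]
      calc v' < 2 ^ bits' := hv'lt
        _ = 2 ^ bits'' * 2 ^ (7 * q) := by rw [← pow_add]; congr 1; omega
    rw [ih hr' v'' bits'' _ hv''lt (by omega)]
    -- abbreviations for the three maps
    set P := pvPack r with hP
    set V := v + pvPack (b :: r) * 2 ^ bits with hV
    have hVeq : V = v' + P * 2 ^ bits' := by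
      rw [hV, hv'def]
      show v + (b.natAbs + P * 256) * 2 ^ bits = _
      rw [hbits', pow_add, show (2:Nat) ^ 8 = 256 by norm_num]
      ring
    have hK : (bits + pvTot (b :: r)) / 7 = q + (bits'' + pvTot r) / 7 := by
      show (bits + (8 + pvTot r)) / 7 = _
      rw [show bits + (8 + pvTot r) = 7 * q + (bits'' + pvTot r) by omega,
          Nat.mul_add_div (by norm_num)]
    -- split of V after q emitted septets
    have hsplit : V / 2 ^ (7 * q) = v'' + P * 2 ^ bits'' := by
      rw [hVeq, show P * 2 ^ bits' = P * 2 ^ bits'' * 2 ^ (7 * q) by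
            rw [mul_assoc, ← pow_add]; congr 2; omega,
          Nat.add_mul_div_right _ _ (by positivity), hv'']
    rw [hK, List.range_add, List.map_append, List.map_map]
    rw [List.reverse_append, List.reverse_reverse, List.append_assoc]
    congr 1
    congr 1
    · -- emitted septets agree with the first q positions of V
      apply List.map_congr_left
      intro j hj
      rw [List.mem_range] at hj
      have h7 : 7 * j + 7 ≤ bits' := by omega
      congr 1
      rw [hVeq, show P * 2 ^ bits' = P * 2 ^ (bits' - (7 * j) - 7) * 2 ^ 7 * 2 ^ (7 * j) by
            rw [mul_assoc, mul_assoc, ← pow_add, ← pow_add]; congr 2; omega,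
          Nat.add_mul_div_right _ _ (by positivity)]
      rw [show P * 2 ^ (bits' - 7 * j - 7) * 2 ^ 7 = P * 2 ^ (bits' - 7 * j - 7) * 128 by norm_num,
          Nat.add_mul_mod_self_right]
    · -- remaining septets
      apply List.map_congr_left
      intro j _
      simp only [Function.comp]
      congr 1
      rw [show 7 * (q + j) = 7 * q + 7 * j by ring, pow_add, ← Nat.div_div_eq_div_mul, hsplit]

-- the two septet lists coincide
theorem pvSepts_eq (f : List Int) (hf : ∀ b ∈ f, 0 ≤ b ∧ b < 256) :
    ((PySem.List.pyRange 0 ((((f.map (fun i => pvBin8 i)).reverse).flatten.drop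
        ((((f.map (fun i => pvBin8 i)).reverse).flatten).length % 7)).length : Int) 7).map
      (fun i => pvParseBin (PySem.List.slice (((f.map (fun i => pvBin8 i)).reverse).flatten.drop
        ((((f.map (fun i => pvBin8 i)).reverse).flatten).length % 7)) (some i) (some (i + 7))))).reverse =
    pvUnpack f 0 0 [] := by
  obtain ⟨hbv, hlen⟩ := pvFlat_spec f hf
  set S := ((f.map (fun i => pvBin8 i)).reverse).flatten with hS
  set m := pvTot f / 7 with hm
  have hlm : (S.drop (S.length % 7)).length = 7 * m := by
    rw [List.length_drop, hlen, hm]; omega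
  rw [pvIntsA (S.drop (S.length % 7)) m hlm]
  have hB := pvUnpack_spec f hf 0 0 [] (by norm_num) (by norm_num)
  simp only [Nat.cast_zero, Nat.zero_add, pow_zero, mul_one, List.reverse_nil,
    List.nil_append] at hB
  rw [hB]
  have hlv : pvBV (S.drop (S.length % 7)) = pvPack f % 2 ^ (7 * m) := by
    rw [pvBV_drop S (S.length % 7) (by omega), hbv, hlen, hm]
    congr 2
    omega
  apply List.map_congr_left
  intro j hj
  rw [List.mem_range] at hj
  congr 1
  rw [hlv]
  set R := pvPack f % 2 ^ (7 * m) with hR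
  set Q := pvPack f / 2 ^ (7 * m) with hQ
  have hdecomp : pvPack f = R + Q * 2 ^ (7 * m - 7 * j - 7) * 2 ^ 7 * 2 ^ (7 * j) := by
    rw [show Q * 2 ^ (7 * m - 7 * j - 7) * 2 ^ 7 * 2 ^ (7 * j) = Q * 2 ^ (7 * m) by
          rw [mul_assoc, mul_assoc, ← pow_add, ← pow_add]; congr 2; omega]
    rw [hR, hQ]
    exact (Nat.mod_add_div' _ _).symm
  conv_rhs => rw [hdecomp]
  rw [mul_assoc (Q * 2 ^ (7 * m - 7 * j - 7)), ← mul_assoc]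
  rw [Nat.add_mul_div_right _ _ (by positivity : 0 < 2 ^ (7 * j))]
  rw [show Q * 2 ^ (7 * m - 7 * j - 7) * 2 ^ 7 = Q * 2 ^ (7 * m - 7 * j - 7) * 128 by norm_num,
      Nat.add_mul_mod_self_right]

-- A's accumulator fold equals B's two-step recursion
theorem pvFold_eq (l : List Int) : ∀ (res : List Char),
    (l.foldl pvStepA (res, false)).1 = res ++ pvMapSepts l ∧
    (l.foldl pvStepA (res, true)).1 = res ++ (match l with
      | [] => []
      | t :: r => pvLookup pvExtChars t :: pvMapSepts r) := by
  induction l with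
  | nil => intro res; simp [pvMapSepts]
  | cons s rest ih =>
    intro res
    constructor
    · simp only [List.foldl_cons]
      by_cases h : s = 27
      · rw [show pvStepA (res, false) s = (res, true) by simp [pvStepA, h]]
        rw [(ih res).2]
        subst h
        cases rest with
        | nil => simp [pvMapSepts]
        | cons t r => simp [pvMapSepts]
      · rw [show pvStepA (res, false) s = (res ++ [pvLookup pvGsmChars s], false) by
            simp [pvStepA, h]]
        rw [(ih _).1]
        rw [show pvMapSepts (s :: rest) = pvLookup pvGsmChars s :: pvMapSepts rest by
            rw [pvMapSepts.eq_def]; simp [h]]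
        simp
    · simp only [List.foldl_cons]
      rw [show pvStepA (res, true) s = (res ++ [pvLookup pvExtChars s], false) by simp [pvStepA]]
      rw [(ih _).1]
      simp

-- ===== VERDICT (by name: the statement is the Claim_ definition above) =====
theorem gsm7bit_decode_spec : Claim_equal_gsm7bit_decode := by
  intro f _ hPre
  unfold Spec_gsm7bit_decode
  by_cases hf : f = []
  · subst hf; rfl
  · unfold gsm7bit_decode gsm7bit_decode_alt
    rw [if_neg (by simpa using hf)]
    simp only [PySem.List.slice_from_natCast]
    rw [pvSepts_eq f hPre]
    generalize pvUnpack f 0 0 [] = L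
    have key : ∀ (M : List Int), ((M).foldl pvStepA ([], false)).1 = pvMapSepts M := by
      intro M
      simpa using (pvFold_eq M []).1
    cases L with
    | nil =>
      simp [PySem.List.pyGet?, pvMapSepts]
    | cons a t =>
      rw [PySem.List.pyGet?_zero_cons]
      by_cases ha : a = 0
      · subst ha
        rw [if_pos rfl]
        simp only [List.drop_one, List.tail_cons]
        rw [key]
      · rw [if_neg (by simpa using ha)]
        rw [key]
        have hm : (match (a :: t : List Int) with | 0 :: rest => rest | l => l) = a :: t := by
          split <;> simp_all
        rw [hm]
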